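-- pv_equiv track=rewrite | github.com/Predrag777/Akinator_prototype | DatasetCreator/questions_generator.py | questions_builder
-- ===== SOURCE A (Python) =====
-- def questions_builder(questions):
--     c=0
--     arr=[]
--     for i in questions:
--         if c==0:
--             arr.append("Is your animal tall?")
--         elif c==1:
--             arr.append("Is your animal heavy?")
--         elif c==2:
--             arr.append("Is your animal long-lived?")
--         elif c==3:
--             arr.append("Is your animal fast?")
--         elif c<76:
--             arr.append(f"Is {i} enemy of your animal?")
--         elif c<84:
--             arr.append(f"Is {i} color of your animal?")
--         else:
--             arr.append(f'Is {i} habitat of your animal?')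
--         c+=1
--     return arr
-- ===== SOURCE B (Python) =====
-- def questions_builder(questions):
--     fixed = ["Is your animal tall?", "Is your animal heavy?",
--              "Is your animal long-lived?", "Is your animal fast?"][:len(questions)]
--     enemy = [f"Is {i} enemy of your animal?" for i in questions[4:76]]
--     color = [f"Is {i} color of your animal?" for i in questions[76:84]]
--     habitat = [f"Is {i} habitat of your animal?" for i in questions[84:]]
--     return fixed + enemy + color + habitat
-- ===== Notes on version B (the rewrite author's own statement) =====
-- stated objective: simpler
-- what changed: Replaces the counter-carrying loop with a per-element index cascade by slicing the input into its four contiguous index segments (0-3 fixed, 4-75 enemy, 76-83 color, 84+ habitat) and concatenating the mapped segments.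
import Mathlib
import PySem

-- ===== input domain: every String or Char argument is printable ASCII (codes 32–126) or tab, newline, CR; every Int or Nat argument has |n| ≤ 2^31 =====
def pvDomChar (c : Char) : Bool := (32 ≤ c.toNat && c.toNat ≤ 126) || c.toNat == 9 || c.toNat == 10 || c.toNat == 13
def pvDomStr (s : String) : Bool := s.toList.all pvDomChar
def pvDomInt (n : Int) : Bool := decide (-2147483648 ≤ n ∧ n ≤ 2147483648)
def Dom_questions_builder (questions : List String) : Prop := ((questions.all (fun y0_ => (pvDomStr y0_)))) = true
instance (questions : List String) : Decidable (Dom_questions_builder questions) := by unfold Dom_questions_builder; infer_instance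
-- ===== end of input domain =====

-- B builds the output from the four contiguous index segments by slicing instead of
-- A's counter-carrying loop; objective: simpler.

-- ===== PORT A =====
-- loop body of A's for-loop, over the state (c, arr)
def questions_builder_step (st : Int × List String) (i : String) : Int × List String :=
  if st.1 = 0 then (st.1 + 1, st.2 ++ ["Is your animal tall?"])
  else if st.1 = 1 then (st.1 + 1, st.2 ++ ["Is your animal heavy?"])
  else if st.1 = 2 then (st.1 + 1, st.2 ++ ["Is your animal long-lived?"])
  else if st.1 = 3 then (st.1 + 1, st.2 ++ ["Is your animal fast?"])
  else if st.1 < 76 then (st.1 + 1, st.2 ++ ["Is " ++ i ++ " enemy of your animal?"])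
  else if st.1 < 84 then (st.1 + 1, st.2 ++ ["Is " ++ i ++ " color of your animal?"])
  else (st.1 + 1, st.2 ++ ["Is " ++ i ++ " habitat of your animal?"])

def questions_builder (questions : List String) : List String :=
  (questions.foldl questions_builder_step ((0 : Int), ([] : List String))).2

-- ===== PORT B =====
def questions_builder_alt (questions : List String) : List String :=
  let fixed := PySem.List.slice
      ["Is your animal tall?", "Is your animal heavy?",
       "Is your animal long-lived?", "Is your animal fast?"]
      none (some (questions.length : Int))
  let enemy := (PySem.List.slice questions (some 4) (some 76)).map
      (fun i => "Is " ++ i ++ " enemy of your animal?")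
  let color := (PySem.List.slice questions (some 76) (some 84)).map
      (fun i => "Is " ++ i ++ " color of your animal?")
  let habitat := (PySem.List.slice questions (some 84) none).map
      (fun i => "Is " ++ i ++ " habitat of your animal?")
  fixed ++ enemy ++ color ++ habitat

-- ===== PRECONDITION & SPEC =====
def Spec_questions_builder (questions : List String) (out : List String) : Prop := out = questions_builder_alt questions
instance (questions : List String) (out : List String) : Decidable (Spec_questions_builder questions out) := by unfold Spec_questions_builder; infer_instance

-- ===== CLAIM (what is proved, stated in full; the proofs are below) =====
def Claim_equal_questions_builder : Prop := ∀ (questions : List String), Dom_questions_builder questions → Spec_questions_builder questions (questions_builder questions)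

-- ===== LEMMAS AND PROOFS =====

def pvEnemy (i : String) : String := "Is " ++ i ++ " enemy of your animal?"
def pvColor (i : String) : String := "Is " ++ i ++ " color of your animal?"
def pvHabitat (i : String) : String := "Is " ++ i ++ " habitat of your animal?"

def pvF (c : Int) (i : String) : String :=
  if c = 0 then "Is your animal tall?"
  else if c = 1 then "Is your animal heavy?"
  else if c = 2 then "Is your animal long-lived?"
  else if c = 3 then "Is your animal fast?"
  else if c < 76 then pvEnemy i
  else if c < 84 then pvColor i
  else pvHabitat i

def pvAux (c : Int) : List String → List String
  | [] => []
  | q :: t => pvF c q :: pvAux (c + 1) t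

theorem pv_step_eq (c : Int) (acc : List String) (i : String) :
    questions_builder_step (c, acc) i = (c + 1, acc ++ [pvF c i]) := by
  simp only [questions_builder_step, pvF]
  split_ifs <;> rfl

theorem pv_foldl_eq (qs : List String) : ∀ (c : Int) (acc : List String),
    (qs.foldl questions_builder_step (c, acc)).2 = acc ++ pvAux c qs := by
  induction qs with
  | nil => intro c acc; simp [pvAux]
  | cons q t ih =>
    intro c acc
    simp only [List.foldl_cons, pv_step_eq, pvAux, ih]
    simp

theorem pvF_enemy (c : Int) (i : String) (h1 : 4 ≤ c) (h2 : c < 76) : pvF c i = pvEnemy i := by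
  simp only [pvF]; split_ifs <;> first | rfl | omega

theorem pvF_color (c : Int) (i : String) (h1 : 76 ≤ c) (h2 : c < 84) : pvF c i = pvColor i := by
  simp only [pvF]; split_ifs <;> first | rfl | omega

theorem pvF_habitat (c : Int) (i : String) (h1 : 84 ≤ c) : pvF c i = pvHabitat i := by
  simp only [pvF]; split_ifs <;> first | rfl | omega

theorem pvAux_seg (t : List String) : ∀ (c : Int), 4 ≤ c →
    pvAux c t = (t.take (76 - c).toNat).map pvEnemy
      ++ ((t.drop (76 - c).toNat).take (84 - max c 76).toNat).map pvColor
      ++ (t.drop (84 - c).toNat).map pvHabitat := by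
  induction t with
  | nil => intro c hc; simp [pvAux]
  | cons q t ih =>
    intro c hc
    rcases lt_or_ge c 76 with h1 | h1
    · have e1 : (76 - c).toNat = (76 - (c + 1)).toNat + 1 := by omega
      have e2 : (84 - c).toNat = (84 - (c + 1)).toNat + 1 := by omega
      have e3 : (84 - max c 76).toNat = (84 - max (c + 1) 76).toNat := by omega
      rw [pvAux, pvF_enemy c q hc h1, e1, e2, e3, List.take_succ_cons,
          List.drop_succ_cons, List.drop_succ_cons, ih (c + 1) (by omega)]
      simp
    · rcases lt_or_ge c 84 with h2 | h2
      · have e1 : (76 - c).toNat = 0 := by omega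
        have e1' : (76 - (c + 1)).toNat = 0 := by omega
        have e2 : (84 - c).toNat = (84 - (c + 1)).toNat + 1 := by omega
        have e3 : (84 - max c 76).toNat = (84 - max (c + 1) 76).toNat + 1 := by omega
        rw [pvAux, pvF_color c q h1 h2, e1, e2, e3, ih (c + 1) (by omega), e1']
        simp
      · have e1 : (76 - c).toNat = 0 := by omega
        have e1' : (76 - (c + 1)).toNat = 0 := by omega
        have e2 : (84 - c).toNat = 0 := by omega
        have e2' : (84 - (c + 1)).toNat = 0 := by omega
        have e3 : (84 - max c 76).toNat = 0 := by omega
        have e3' : (84 - max (c + 1) 76).toNat = 0 := by omega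
        rw [pvAux, pvF_habitat c q h2, e1, e2, e3, ih (c + 1) (by omega), e1', e2', e3']
        simp

theorem pv_alt_eq (qs : List String) :
    questions_builder_alt qs =
      (["Is your animal tall?", "Is your animal heavy?",
        "Is your animal long-lived?", "Is your animal fast?"].take qs.length)
      ++ ((qs.drop 4).take 72).map pvEnemy
      ++ ((qs.drop 76).take 8).map pvColor
      ++ (qs.drop 84).map pvHabitat := by
  simp only [questions_builder_alt]
  rw [PySem.List.slice_toNat qs (a := 4) (b := 76) (by norm_num) (by norm_num),
      PySem.List.slice_toNat qs (a := 76) (b := 84) (by norm_num) (by norm_num),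
      PySem.List.slice_from qs (a := 84) (by norm_num),
      PySem.List.slice_to _ (b := (qs.length : Int)) (by positivity)]
  simp
  rfl

-- ===== VERDICT (by name: the statement is the Claim_ definition above) =====
theorem questions_builder_spec : Claim_equal_questions_builder := by
  intro qs _
  unfold Spec_questions_builder
  rw [pv_alt_eq]
  match qs with
  | [] => rfl
  | [a] =>
    simp [questions_builder, questions_builder_step]
  | [a, b] =>
    simp [questions_builder, questions_builder_step]
  | [a, b, c] =>
    simp [questions_builder, questions_builder_step]
  | a :: b :: c :: d :: t =>
    have hA : questions_builder (a :: b :: c :: d :: t)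
        = "Is your animal tall?" :: "Is your animal heavy?" ::
          "Is your animal long-lived?" :: "Is your animal fast?" :: pvAux 4 t := by
      unfold questions_builder
      rw [pv_foldl_eq]
      rfl
    have hdrop76 : (a :: b :: c :: d :: t).drop 76 = t.drop 72 := by
      rw [show (76 : Nat) = 4 + 72 from rfl, ← List.drop_drop]
      rfl
    have hdrop84 : (a :: b :: c :: d :: t).drop 84 = t.drop 80 := by
      rw [show (84 : Nat) = 4 + 80 from rfl, ← List.drop_drop]
      rfl
    have htake : (["Is your animal tall?", "Is your animal heavy?",
        "Is your animal long-lived?", "Is your animal fast?"].take (a :: b :: c :: d :: t).length)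
        = ["Is your animal tall?", "Is your animal heavy?",
           "Is your animal long-lived?", "Is your animal fast?"] :=
      List.take_of_length_le (by simp)
    rw [hA, hdrop76, hdrop84, htake, pvAux_seg t 4 (by norm_num)]
    norm_num
    simp
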